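-- pv_equiv track=rewrite | github.com/GEM-benchmark/NL-Augmenter | transformations/mix_transliteration/transliterator.py | ngram_context
-- ===== SOURCE A (Python) =====
-- def ngram_context(letters, n=4):
--     feats = []
--     dummies = ["_"] * n
--     context = dummies + letters + dummies
--     for i in range(n, len(context) - n):
--         unigrams = context[i - n: i] +\
--             [context[i]] +\
--             context[i + 1: i + (n + 1)]
--         ngrams = ['|'.join(ng) for k in range(2, n + 1) for ng in zip(*[unigrams[j:] for j in range(k)])]
--         feats.append(unigrams + ngrams)
--     return feats
-- ===== SOURCE B (Python) =====
-- def ngram_context(letters, n=4):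
--     dummies = ["_"] * n
--     context = dummies + letters + dummies
--     L = len(context)
--     # global k-gram tables over the padded context, built once:
--     # tables[k-2][p] == '|'.join(context[p:p+k])
--     tables = [['|'.join(context[p:p + k]) for p in range(L - k + 1)]
--               for k in range(2, n + 1)]
--     feats = []
--     for i in range(n, L - n):
--         row = context[i - n:i + n + 1]
--         for k, tab in zip(range(2, n + 1), tables):
--             row += tab[i - n:i + n + 2 - k]
--         feats.append(row)
--     return feats
-- ===== Notes on version B (the rewrite author's own statement) =====
-- stated objective: alternative
-- what changed: B precomputes one global k-gram join table per k over the padded context and assembles each per-letter feature row by slicing those tables, instead of re-zipping and re-joining every overlapping k-gram inside every 2n+1 window as A does.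
import Mathlib
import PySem

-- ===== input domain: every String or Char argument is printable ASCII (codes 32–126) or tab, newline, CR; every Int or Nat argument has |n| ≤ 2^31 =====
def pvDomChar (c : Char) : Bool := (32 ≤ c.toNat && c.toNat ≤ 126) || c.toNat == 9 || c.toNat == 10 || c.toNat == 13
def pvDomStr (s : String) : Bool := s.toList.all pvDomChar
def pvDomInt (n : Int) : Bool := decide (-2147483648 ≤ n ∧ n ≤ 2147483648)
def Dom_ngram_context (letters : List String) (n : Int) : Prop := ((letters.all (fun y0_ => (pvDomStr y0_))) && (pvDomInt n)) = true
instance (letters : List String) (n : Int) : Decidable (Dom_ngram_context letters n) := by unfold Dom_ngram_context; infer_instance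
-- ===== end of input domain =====

-- B precomputes one global k-gram table per k over the padded context and assembles each
-- per-letter row by slicing those tables, instead of re-joining every k-gram inside every window.

-- ===== PORT A =====
-- zip(*ls) ported by hand (no PySem primitive): take the head of every list, recurse on the
-- tails, stop as soon as any list is exhausted (or there are no lists) — exactly zip's semantics.
def pyZipStar (ls : List (List String)) : List (List String) :=
  if ls.isEmpty || ls.any List.isEmpty then []
  else ls.map (fun l => l.headD "") :: pyZipStar (ls.map List.tail)
termination_by (ls.headD []).length
decreasing_by
  rename_i h
  rw [Bool.or_eq_true, not_or] at h
  obtain ⟨h1, h2⟩ := h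
  cases ls with
  | nil => simp at h1
  | cons a t =>
    have ha : a ≠ [] := by
      intro hae; subst hae; simp at h2
    cases a with
    | nil => exact absurd rfl ha
    | cons x xs => simp

def ngram_context (letters : List String) (n : Int) : List (List String) :=
  let dummies := List.replicate n.toNat "_"          -- ["_"] * n  (empty for n ≤ 0, as in Python)
  let context := dummies ++ letters ++ dummies
  (PySem.List.pyRange n ((context.length : Int) - n) 1).foldl (fun feats i =>
    -- context[i] never raises here: under Pre_ (0 ≤ n) every i of the range is in bounds
    let unigrams := PySem.List.slice context (some (i - n)) (some i) ++
                    [PySem.List.pyGetD context i ""] ++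
                    PySem.List.slice context (some (i + 1)) (some (i + (n + 1)))
    let ngrams := (PySem.List.pyRange 2 (n + 1) 1).flatMap (fun k =>
      (pyZipStar ((PySem.List.pyRange 0 k 1).map
          (fun j => PySem.List.slice unigrams (some j) none))).map
        (fun ng => PySem.Str.join "|" ng))
    feats ++ [unigrams ++ ngrams]) []

-- ===== PORT B =====
def ngram_context_alt (letters : List String) (n : Int) : List (List String) :=
  let dummies := List.replicate n.toNat "_"
  let context := dummies ++ letters ++ dummies
  let L : Int := context.length
  let tables := (PySem.List.pyRange 2 (n + 1) 1).map (fun k =>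
    (PySem.List.pyRange 0 (L - k + 1) 1).map
      (fun p => PySem.Str.join "|" (PySem.List.slice context (some p) (some (p + k)))))
  (PySem.List.pyRange n (L - n) 1).foldl (fun feats i =>
    let row := PySem.List.slice context (some (i - n)) (some (i + n + 1))
    let row := ((PySem.List.pyRange 2 (n + 1) 1).zip tables).foldl (fun row kt =>
      row ++ PySem.List.slice kt.2 (some (i - n)) (some (i + n + 2 - kt.1))) row
    feats ++ [row]) []

-- ===== PRECONDITION & SPEC =====
-- A raises IndexError (context[i] with i past the end) for every n < 0; Pre_ keeps n ≥ 0.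
def Pre_ngram_context (letters : List String) (n : Int) : Prop := 0 ≤ n
instance (letters : List String) (n : Int) : Decidable (Pre_ngram_context letters n) := by unfold Pre_ngram_context; infer_instance
def pvWitness_ngram_context : List String × Int := (["a", "b", "c"], 2)
def Spec_ngram_context (letters : List String) (n : Int) (out : List (List String)) : Prop := out = ngram_context_alt letters n
instance (letters : List String) (n : Int) (out : List (List String)) : Decidable (Spec_ngram_context letters n out) := by unfold Spec_ngram_context; infer_instance

-- ===== CLAIM (what is proved, stated in full; the proofs are below) =====
def Claim_equal_ngram_context : Prop := ∀ (letters : List String) (n : Int), Dom_ngram_context letters n → Pre_ngram_context letters n → Spec_ngram_context letters n (ngram_context letters n)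

-- ===== LEMMAS AND PROOFS =====

-- zip(*[u[j:] for j in range(K)]) enumerates the K-windows of u.
theorem zipStar_shifts (K : Nat) (u : List String) (h1 : 1 ≤ K) (h2 : K ≤ u.length) :
    pyZipStar ((List.range K).map (fun j => u.drop j)) =
      (List.range (u.length + 1 - K)).map (fun q => (u.drop q).take K) := by
  induction u with
  | nil => simp at h2; omega
  | cons a t ih =>
    rw [pyZipStar]
    have hcond : (((List.range K).map (fun j => (a :: t).drop j)).isEmpty
        || ((List.range K).map (fun j => (a :: t).drop j)).any List.isEmpty) = false := by
      simp only [Bool.or_eq_false_iff, List.isEmpty_eq_false_iff, List.any_eq_false]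
      constructor
      · simp; omega
      · intro l hl
        simp only [List.mem_map, List.mem_range] at hl
        obtain ⟨j, hj, rfl⟩ := hl
        simp only [List.isEmpty_iff, ← List.length_eq_zero_iff, List.length_drop,
          List.length_cons]
        simp only [List.length_cons] at h2
        omega
    rw [hcond]
    simp only [Bool.false_eq_true, if_false]
    have hheads : ((List.range K).map (fun j => (a :: t).drop j)).map (fun l => l.headD "")
        = (a :: t).take K := by
      apply List.ext_getElem
      · simp only [List.length_map, List.length_range, List.length_take, List.length_cons]
        simp only [List.length_cons] at h2
        omega
      · intro j hj1 hj2
        simp only [List.getElem_map, List.getElem_range, List.getElem_take]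
        simp only [List.length_map, List.length_range] at hj1
        have hjl : j < (a :: t).length := by simp only [List.length_cons] at h2 ⊢; omega
        rw [List.headD_eq_head?_getD, List.head?_drop, List.getElem?_eq_getElem hjl]
        simp
    have htails : ((List.range K).map (fun j => (a :: t).drop j)).map List.tail
        = (List.range K).map (fun j => t.drop j) := by
      simp only [List.map_map]
      apply List.map_congr_left
      intro j _
      simp [List.tail_drop]
    rw [hheads, htails]
    by_cases hK : K ≤ t.length
    · rw [ih hK]
      have : (a :: t).length + 1 - K = (t.length + 1 - K) + 1 := by simp; omega
      rw [this, List.range_succ_eq_map, List.map_cons, List.map_map]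
      simp only [List.drop_zero]
      congr 1
    · -- K = t.length + 1: the recursive call sees an exhausted shift and stops
      have hKe : K = t.length + 1 := by simp at h2; omega
      rw [pyZipStar]
      have : ((List.range K).map (fun j => t.drop j)).any List.isEmpty = true := by
        simp only [List.any_eq_true]
        refine ⟨t.drop t.length, List.mem_map.mpr ⟨t.length, by simp [hKe], rfl⟩, by simp⟩
      rw [this]
      simp only [Bool.or_true, if_true]
      have : (a :: t).length + 1 - K = 1 := by simp [hKe]
      rw [this]
      simp

theorem foldl_zip_self_map {α β γ : Type} (l : List α) (tbl : α → β) (f : γ → α × β → γ)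
    (init : γ) :
    (l.zip (l.map tbl)).foldl f init = l.foldl (fun acc k => f acc (k, tbl k)) init := by
  induction l generalizing init with
  | nil => rfl
  | cons a t ih => simp [ih]

-- 'for x in l: out += g(x)' congruence
theorem flatMap_congr_mem {α β : Type} (l : List α) (f g : α → List β)
    (h : ∀ x ∈ l, f x = g x) : l.flatMap f = l.flatMap g := by
  induction l with
  | nil => rfl
  | cons a t ih =>
    simp only [List.flatMap_cons, h a (by simp), ih (fun x hx => h x (by simp [hx]))]

theorem ngram_context_main : ∀ (letters : List String) (n : Int), 0 ≤ n →
    ngram_context letters n = ngram_context_alt letters n := by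
  intro letters n hn
  obtain ⟨N, rfl⟩ := Int.eq_ofNat_of_zero_le hn
  simp only [ngram_context, ngram_context_alt, Int.toNat_natCast]
  rw [PySem.List.foldl_append_singleton_eq_map, PySem.List.foldl_append_singleton_eq_map]
  simp only [List.nil_append]
  apply List.map_congr_left
  intro i hi
  rw [PySem.List.mem_pyRange_one] at hi
  set ctx := List.replicate N "_" ++ letters ++ List.replicate N "_" with hctx
  obtain ⟨hiN, hiL⟩ := hi
  obtain ⟨I, rfl⟩ := Int.eq_ofNat_of_zero_le (le_trans (Int.natCast_nonneg N) hiN)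
  have hNI : N ≤ I := by exact_mod_cast hiN
  have hIL : I + N < ctx.length := by omega
  -- normalize all Int index arithmetic to casts of Nat expressions
  rw [← Int.natCast_sub hNI]
  rw [show (I : Int) + 1 = ((I + 1 : Nat) : Int) by norm_cast]
  rw [show (I : Int) + ((N : Int) + 1) = ((I + N + 1 : Nat) : Int) by push_cast; ring]
  rw [show (I : Int) + (N : Int) + 1 = ((I + N + 1 : Nat) : Int) by push_cast; ring]
  rw [PySem.List.pyGetD_eq_getElem ctx "" (Int.natCast_nonneg I) (by omega)]
  simp only [PySem.List.slice_natCast, Int.toNat_natCast]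
  rw [show I - (I - N) = N by omega]
  rw [show (I + N + 1) - (I + 1) = N by omega]
  rw [show (I + N + 1) - (I - N) = 2 * N + 1 by omega]
  -- B: the zip over the table list is a loop over k; appending slices is a flatMap
  rw [foldl_zip_self_map]
  simp only []
  rw [PySem.List.foldl_append_eq_flatMap]
  -- the three unigram slices are one window
  have hIlt : I < ctx.length := by omega
  have hU : (ctx.drop (I - N)).take N ++ [ctx[I]] ++ (ctx.drop (I + 1)).take N
      = (ctx.drop (I - N)).take (2 * N + 1) := by
    rw [show 2 * N + 1 = N + (N + 1) by omega, List.take_add, List.drop_drop,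
      show I - N + N = I by omega, show N + 1 = 1 + N by omega, List.take_add,
      List.drop_drop, show I + 1 = 1 + I by omega]
    rw [List.take_one, List.head?_drop, List.getElem?_eq_getElem (by omega)]
    simp
  rw [hU]
  congr 1
  apply flatMap_congr_mem
  intro k hk
  rw [PySem.List.mem_pyRange_one] at hk
  obtain ⟨K, rfl⟩ := Int.eq_ofNat_of_zero_le (le_trans (by norm_num) hk.1)
  have hK2 : 2 ≤ K := by exact_mod_cast hk.1
  have hKN : K ≤ N := by have := hk.2; omega
  have hWlen : ((ctx.drop (I - N)).take (2 * N + 1)).length = 2 * N + 1 := by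
    simp only [List.length_take, List.length_drop]; omega
  have hshift : ∀ u : List String,
      (PySem.List.pyRange 0 (K : Int)).map (fun j => PySem.List.slice u (some j))
        = (List.range K).map (fun j => u.drop j) := by
    intro u
    rw [PySem.List.pyRange_one]
    simp only [Int.sub_zero, Int.toNat_natCast, List.map_map]
    apply List.map_congr_left
    intro j _
    simp only [Function.comp_apply, zero_add, PySem.List.slice_from_natCast]
  rw [hshift]
  rw [zipStar_shifts K _ (by omega) (by rw [hWlen]; omega)]
  rw [hWlen]
  -- turn the table slice into the same window list
  rw [show ((I : Int) + (N : Int) + 2 - (K : Int)) = ((I + N + 2 - K : Nat) : Int) by omega]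
  rw [show ((ctx.length : Int) - (K : Int) + 1) = ((ctx.length + 1 - K : Nat) : Int) by omega]
  rw [PySem.List.pyRange_one]
  simp only [Int.sub_zero, Int.toNat_natCast, List.map_map]
  have htbl : (List.range (ctx.length + 1 - K)).map
        ((fun p => PySem.Str.join "|" (PySem.List.slice ctx (some p) (some (p + (K : Int))))) ∘
          (fun k : ℕ => ((0 : Int) + k)))
      = (List.range (ctx.length + 1 - K)).map
        (fun p => PySem.Str.join "|" ((ctx.drop p).take K)) := by
    apply List.map_congr_left
    intro p _
    simp only [Function.comp_apply, zero_add, PySem.List.slice_natCast_add]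
  rw [htbl]
  rw [PySem.List.slice_natCast]
  rw [show (I + N + 2 - K) - (I - N) = 2 * N + 2 - K by omega]
  apply List.ext_getElem
  · simp only [List.length_map, List.length_range, List.length_take, List.length_drop]
    omega
  · intro q hq1 hq2
    simp only [List.length_map, List.length_range] at hq1
    simp only [List.getElem_map, List.getElem_range, List.getElem_take, List.getElem_drop,
      Function.comp_apply]
    have hbody : (((ctx.drop (I - N)).take (2 * N + 1)).drop q).take K
        = (ctx.drop (I - N + q)).take K := by
      rw [List.drop_take, List.drop_drop, List.take_take,
        show min K (2 * N + 1 - q) = K by omega]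
    rw [hbody]



-- ===== VERDICT (by name: the statement is the Claim_ definition above) =====
theorem ngram_context_spec : Claim_equal_ngram_context := by
  intro letters n _ hpre
  exact ngram_context_main letters n hpre
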